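-- pv_equiv track=rewrite | github.com/MysticSheep212/a5.py | a5.py | assemble_di
-- ===== SOURCE A (Python) =====
-- special_combinations = {
--     1000: [1, 2, 3],  # Loco!; 2 chips
--     2000: [1, 1, 1],  # Three of a kinds; 3 chip
--     3000: [2, 2, 2],
--     4000: [3, 3, 3],
--     5000: [4, 4, 4],
--     6000: [5, 5, 5],
--     7000: [6, 6, 6],
--     8000: [4, 5, 6],  # PoCo! 4 chips
-- }
--
-- di_pieces = {
--     "cap": " ----- ",
--     "blank": "|     |",
--     "left_one": "| o   |",
--     "center_one": "|  o  |",
--     "right_one": "|   o |",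
--     "two": "| o o |",
-- }
--
-- def assemble_di(roll_value, roll):
--     """Assembles the faces of the di in a list using the di_pieces dictionary"""
--     di = []
--     di.append(di_pieces["cap"])
--     for i in range(3):  # fills the 3 rows of the di
--         if i == 0:
--             if roll_value == 1:
--                 di.append(di_pieces["blank"])
--             elif roll_value in [2, 3]:
--                 di.append(di_pieces["left_one"])
--             else:  # nums 4, 5, or 6
--                 di.append(di_pieces["two"])
--         if i == 1:
--             if roll_value == 6:
--                 di.append(di_pieces["two"])
--             elif roll_value in [2, 4]:
--                 di.append(di_pieces["blank"])
--             else:  # nums 1, 3, or 5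
--                 di.append(di_pieces["center_one"])
--         if i == 2:
--             if roll_value == 1:
--                 di.append(di_pieces["blank"])
--             elif roll_value in [2, 3]:
--                 di.append(di_pieces["right_one"])
--             else:  # nums 4, 5, or 6
--                 di.append(di_pieces["two"])
--     di.append(di_pieces["cap"])
--
--     # Apply yellow colour if roll_value is 1 or 6
--     if roll_value in [1, 6] and roll not in special_combinations.values():
--         di = [f"\033[33m{line}\033[0m" for line in di]  # Apply yellow to each line
--
--     # Apply purple coloyr if roll is a special combination
--     if roll in special_combinations.values():
--         di = [f"\033[95m{line}\033[0m" for line in di]  # Apply purple to each line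
--     return di
-- ===== SOURCE B (Python) =====
-- special_combinations = {
--     1000: [1, 2, 3],
--     2000: [1, 1, 1],
--     3000: [2, 2, 2],
--     4000: [3, 3, 3],
--     5000: [4, 4, 4],
--     6000: [5, 5, 5],
--     7000: [6, 6, 6],
--     8000: [4, 5, 6],
-- }
--
-- di_pieces = {
--     "cap": " ----- ",
--     "blank": "|     |",
--     "left_one": "| o   |",
--     "center_one": "|  o  |",
--     "right_one": "|   o |",
--     "two": "| o o |",
-- }
--
-- _faces = {
--     1: ("blank", "center_one", "blank"),
--     2: ("left_one", "blank", "right_one"),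
--     3: ("left_one", "center_one", "right_one"),
--     4: ("two", "blank", "two"),
--     5: ("two", "center_one", "two"),
--     6: ("two", "two", "two"),
-- }
--
-- def assemble_di(roll_value, roll):
--     """Assembles the faces of the di in a list using the di_pieces dictionary"""
--     face = _faces.get(roll_value, ("two", "center_one", "two"))
--     di = [di_pieces["cap"]] + [di_pieces[name] for name in face] + [di_pieces["cap"]]
--     if roll in special_combinations.values():
--         return [f"\033[95m{line}\033[0m" for line in di]
--     if roll_value in [1, 6]:
--         return [f"\033[33m{line}\033[0m" for line in di]
--     return di
-- ===== Notes on version B (the rewrite author's own statement) =====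
-- stated objective: simpler
-- what changed: Replaces the range(3) loop with its per-row if/elif chains by a table mapping each roll_value to its triple of middle rows (with the else-branch triple as default), and collapses the two sequential coloring passes into a single early-return choice of color.
import Mathlib
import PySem

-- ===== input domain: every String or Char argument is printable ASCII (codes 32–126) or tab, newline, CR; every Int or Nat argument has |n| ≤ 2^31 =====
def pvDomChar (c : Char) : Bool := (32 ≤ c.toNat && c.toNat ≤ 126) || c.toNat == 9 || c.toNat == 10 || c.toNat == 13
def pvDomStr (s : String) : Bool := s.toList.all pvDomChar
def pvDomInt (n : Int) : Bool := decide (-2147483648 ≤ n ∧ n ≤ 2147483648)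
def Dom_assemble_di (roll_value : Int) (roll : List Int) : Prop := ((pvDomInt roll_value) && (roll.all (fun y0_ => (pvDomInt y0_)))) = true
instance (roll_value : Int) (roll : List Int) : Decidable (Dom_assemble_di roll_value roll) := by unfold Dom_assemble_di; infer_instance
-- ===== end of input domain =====

-- B replaces the range(3) loop with its per-row if/elif chains by a table from roll_value to the
-- triple of middle rows, and collapses the two coloring passes into one early-return choice.

-- ===== PORT A =====
-- module-level dicts; every lookup in A uses a key that is present, so getD's default is never hit
def specialCombinations : PySem.Dict Int (List Int) :=
  PySem.Dict.ofList [(1000, [1, 2, 3]), (2000, [1, 1, 1]), (3000, [2, 2, 2]), (4000, [3, 3, 3]),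
    (5000, [4, 4, 4]), (6000, [5, 5, 5]), (7000, [6, 6, 6]), (8000, [4, 5, 6])]

def diPieces : PySem.Dict String String :=
  PySem.Dict.ofList [("cap", " ----- "), ("blank", "|     |"), ("left_one", "| o   |"),
    ("center_one", "|  o  |"), ("right_one", "|   o |"), ("two", "| o o |")]

def piece (k : String) : String := PySem.Dict.getD diPieces k ""

def assemble_di (roll_value : Int) (roll : List Int) : List String :=
  let di : List String := []
  let di := di ++ [piece "cap"]
  let di := (PySem.List.pyRange 0 3 1).foldl (fun di i =>
    let di :=
      if i == 0 then
        if roll_value == 1 then di ++ [piece "blank"]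
        else if roll_value == 2 || roll_value == 3 then di ++ [piece "left_one"]
        else di ++ [piece "two"]
      else di
    let di :=
      if i == 1 then
        if roll_value == 6 then di ++ [piece "two"]
        else if roll_value == 2 || roll_value == 4 then di ++ [piece "blank"]
        else di ++ [piece "center_one"]
      else di
    let di :=
      if i == 2 then
        if roll_value == 1 then di ++ [piece "blank"]
        else if roll_value == 2 || roll_value == 3 then di ++ [piece "right_one"]
        else di ++ [piece "two"]
      else di
    di) di
  let di := di ++ [piece "cap"]
  let di :=
    if (roll_value == 1 || roll_value == 6)
        && !((PySem.Dict.values specialCombinations).contains roll) then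
      di.map (fun line => "\x1b[33m" ++ line ++ "\x1b[0m")
    else di
  if (PySem.Dict.values specialCombinations).contains roll then
    di.map (fun line => "\x1b[95m" ++ line ++ "\x1b[0m")
  else di

-- ===== PORT B =====
def facesTable : PySem.Dict Int (String × String × String) :=
  PySem.Dict.ofList [(1, ("blank", "center_one", "blank")), (2, ("left_one", "blank", "right_one")),
    (3, ("left_one", "center_one", "right_one")), (4, ("two", "blank", "two")),
    (5, ("two", "center_one", "two")), (6, ("two", "two", "two"))]

def assemble_di_alt (roll_value : Int) (roll : List Int) : List String :=
  let face := PySem.Dict.getD facesTable roll_value ("two", "center_one", "two")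
  let di := [piece "cap"] ++ ([face.1, face.2.1, face.2.2].map piece) ++ [piece "cap"]
  if (PySem.Dict.values specialCombinations).contains roll then
    di.map (fun line => "\x1b[95m" ++ line ++ "\x1b[0m")
  else if roll_value == 1 || roll_value == 6 then
    di.map (fun line => "\x1b[33m" ++ line ++ "\x1b[0m")
  else di

-- ===== PRECONDITION & SPEC =====
def Spec_assemble_di (roll_value : Int) (roll : List Int) (out : List String) : Prop := out = assemble_di_alt roll_value roll
instance (roll_value : Int) (roll : List Int) (out : List String) : Decidable (Spec_assemble_di roll_value roll out) := by unfold Spec_assemble_di; infer_instance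

-- ===== CLAIM (what is proved, stated in full; the proofs are below) =====
def Claim_equal_assemble_di : Prop := ∀ (roll_value : Int) (roll : List Int), Dom_assemble_di roll_value roll → Spec_assemble_di roll_value roll (assemble_di roll_value roll)

-- ===== LEMMAS AND PROOFS =====
theorem pyRange3 : PySem.List.pyRange 0 3 1 = [0, 1, 2] := by decide

theorem facesTable_items : facesTable.items =
    [(1, ("blank", "center_one", "blank")), (2, ("left_one", "blank", "right_one")),
      (3, ("left_one", "center_one", "right_one")), (4, ("two", "blank", "two")),
      (5, ("two", "center_one", "two")), (6, ("two", "two", "two"))] := by decide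

theorem ports_eq (roll_value : Int) (roll : List Int) :
    assemble_di roll_value roll = assemble_di_alt roll_value roll := by
  by_cases h1 : roll_value = 1
  · subst h1; by_cases m : roll ∈ PySem.Dict.values specialCombinations <;>
      simp [assemble_di, assemble_di_alt, pyRange3, m] <;> decide
  by_cases h2 : roll_value = 2
  · subst h2; by_cases m : roll ∈ PySem.Dict.values specialCombinations <;>
      simp [assemble_di, assemble_di_alt, pyRange3, m] <;> decide
  by_cases h3 : roll_value = 3
  · subst h3; by_cases m : roll ∈ PySem.Dict.values specialCombinations <;>
      simp [assemble_di, assemble_di_alt, pyRange3, m] <;> decide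
  by_cases h4 : roll_value = 4
  · subst h4; by_cases m : roll ∈ PySem.Dict.values specialCombinations <;>
      simp [assemble_di, assemble_di_alt, pyRange3, m] <;> decide
  by_cases h5 : roll_value = 5
  · subst h5; by_cases m : roll ∈ PySem.Dict.values specialCombinations <;>
      simp [assemble_di, assemble_di_alt, pyRange3, m] <;> decide
  by_cases h6 : roll_value = 6
  · subst h6; by_cases m : roll ∈ PySem.Dict.values specialCombinations <;>
      simp [assemble_di, assemble_di_alt, pyRange3, m] <;> decide
  have hf : List.find? (fun p => p.1 == roll_value) facesTable.items = none := by
    rw [List.find?_eq_none]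
    intro x hx
    simp [facesTable_items] at hx
    rcases hx with h | h | h | h | h | h <;> subst h <;> simp <;> omega
  by_cases m : roll ∈ PySem.Dict.values specialCombinations <;>
    simp [assemble_di, assemble_di_alt, pyRange3, PySem.Dict.getD, PySem.Dict.get?, hf, m,
      h1, h2, h3, h4, h6]

-- ===== VERDICT (by name: the statement is the Claim_ definition above) =====
theorem assemble_di_spec : Claim_equal_assemble_di := by
  intro roll_value roll _
  unfold Spec_assemble_di
  exact ports_eq roll_value roll
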